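-- pv_equiv track=rewrite | github.com/ItsMeMaestro/Markov-chain-Song-generator | markov/chainBuilder.py | create_word_dict
-- ===== SOURCE A (Python) =====
-- def ngram_generator(corpus,n ):
--     for i in range(len(corpus) - n):
--         sublist = corpus[i+1:i+n+1].copy()  # Create a copy of the sublist
--         sublist.append(corpus[i])  # First word of the n-gram will be the value in the dictionary
--         yield (tuple(sublist))
--
-- def create_word_dict(n, corpus):
--     word_dict = {}
--     for i in range(n):
--         key_length = i+1
--         for word_list in ngram_generator(corpus, key_length):
--             key = tuple(word_list[:key_length])
--             if key in word_dict:
--                 word_dict[key].append(word_list[-1])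
--             else:
--                 word_dict[key] = [word_list[-1]]
--     return word_dict
-- ===== SOURCE B (Python) =====
-- def create_word_dict(n, corpus):
--     if n <= 0:
--         return {}
--     m = len(corpus)
--     # one bucket dict per key length L = 1..n; single pass over the corpus
--     buckets = [{} for _ in range(n)]
--     for i in range(m):
--         window = corpus[i + 1:i + 1 + n]
--         for L in range(1, len(window) + 1):
--             buckets[L - 1].setdefault(tuple(window[:L]), []).append(corpus[i])
--     result = {}
--     for b in buckets:
--         result.update(b)
--     return result
-- ===== Notes on version B (the rewrite author's own statement) =====
-- stated objective: alternative
-- what changed: Replaces n separate generator passes over the corpus (one per key length) with a single pass over positions that slices the following window once and feeds all n prefix lengths into per-length bucket dicts, merged at the end.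
import Mathlib
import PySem

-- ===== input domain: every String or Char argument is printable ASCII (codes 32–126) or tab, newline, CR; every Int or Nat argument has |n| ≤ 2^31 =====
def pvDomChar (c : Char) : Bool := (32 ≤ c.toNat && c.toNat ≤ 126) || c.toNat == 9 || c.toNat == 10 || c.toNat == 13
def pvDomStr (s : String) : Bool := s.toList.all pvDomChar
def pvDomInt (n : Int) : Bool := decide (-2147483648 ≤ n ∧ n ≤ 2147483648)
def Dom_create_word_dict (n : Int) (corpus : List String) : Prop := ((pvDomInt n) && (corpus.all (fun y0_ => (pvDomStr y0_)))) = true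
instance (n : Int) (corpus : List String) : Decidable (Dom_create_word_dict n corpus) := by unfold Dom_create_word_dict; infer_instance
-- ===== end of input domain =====

-- B builds all n-gram buckets in one pass over the corpus instead of one generator pass per key length; alternative decomposition, return value proved equal.


-- ===== PORT A =====
-- the generator materialised as the list of its yields; corpus[i] is always in range here (i < len - n), ported with pyGetD
def ngram_generator (corpus : List String) (n : Int) : List (List String) :=
  (PySem.List.pyRange 0 ((corpus.length : Int) - n) 1).map (fun i =>
    PySem.List.slice corpus (some (i + 1)) (some (i + n + 1)) ++ [PySem.List.pyGetD corpus i ""])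

def create_word_dict (n : Int) (corpus : List String) : List (List String × List String) :=
  ((PySem.List.pyRange 0 n 1).foldl (fun word_dict i =>
    let key_length := i + 1
    (ngram_generator corpus key_length).foldl (fun wd word_list =>
      let key := PySem.List.slice word_list none (some key_length)
      if wd.contains key then wd.insert key (wd.getD key [] ++ [PySem.List.pyGetD word_list (-1) ""])
      else wd.insert key [PySem.List.pyGetD word_list (-1) ""]) word_dict)
    (PySem.Dict.empty : PySem.Dict (List String) (List String))).items

-- ===== PORT B =====
-- buckets[L-1].setdefault(key, []).append(v): an existing key keeps its position and value grows, a new key appends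
def cwdSetdefAppend (d : PySem.Dict (List String) (List String)) (k : List String) (v : String) :
    PySem.Dict (List String) (List String) :=
  d.insert k (d.getD k [] ++ [v])

def create_word_dict_alt (n : Int) (corpus : List String) : List (List String × List String) :=
  if n ≤ 0 then [] else
  let m : Int := (corpus.length : Int)
  let buckets0 : List (PySem.Dict (List String) (List String)) := List.replicate n.toNat PySem.Dict.empty
  let buckets := (PySem.List.pyRange 0 m 1).foldl (fun bs i =>
    let window := PySem.List.slice corpus (some (i + 1)) (some (i + 1 + n))
    (PySem.List.pyRange 1 ((window.length : Int) + 1) 1).foldl (fun bs' L =>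
      bs'.set (L - 1).toNat
        (cwdSetdefAppend (bs'.getD (L - 1).toNat PySem.Dict.empty)
          (PySem.List.slice window none (some L)) (PySem.List.pyGetD corpus i ""))) bs) buckets0
  (buckets.foldl (fun res b => res.update b.items) (PySem.Dict.empty : PySem.Dict (List String) (List String))).items

-- ===== PRECONDITION & SPEC =====
def Spec_create_word_dict (n : Int) (corpus : List String) (out : List (List String × List String)) : Prop := out = create_word_dict_alt n corpus
instance (n : Int) (corpus : List String) (out : List (List String × List String)) : Decidable (Spec_create_word_dict n corpus out) := by unfold Spec_create_word_dict; infer_instance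

-- ===== CLAIM (what is proved, stated in full; the proofs are below) =====
def Claim_equal_create_word_dict : Prop := ∀ (n : Int) (corpus : List String), Dom_create_word_dict n corpus → Spec_create_word_dict n corpus (create_word_dict n corpus)

-- ===== LEMMAS AND PROOFS =====
def cwdStep (d : PySem.Dict (List String) (List String)) (k : List String) (v : String) :
    PySem.Dict (List String) (List String) :=
  d.insert k (d.getD k [] ++ [v])

theorem cwd_get?_mk_append (P l : List (List String × List String)) (k : List String)
    (h : ∀ p ∈ P, p.1 ≠ k) :
    (PySem.Dict.mk (P ++ l)).get? k = (PySem.Dict.mk l).get? k := by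
  induction P with
  | nil => rfl
  | cons p P ih =>
    rw [List.cons_append, PySem.Dict.get?_mk_cons]
    have hne : (p.1 == k) = false := by simp [h p (by simp)]
    rw [hne]
    simpa using ih (fun q hq => h q (by simp [hq]))

theorem cwd_insert_mk_append (P l : List (List String × List String)) (k : List String)
    (v : List String) (h : ∀ p ∈ P, p.1 ≠ k) :
    (PySem.Dict.mk (P ++ l)).insert k v
      = PySem.Dict.mk (P ++ ((PySem.Dict.mk l).insert k v).items) := by
  have hc : (PySem.Dict.mk (P ++ l)).contains k = (PySem.Dict.mk l).contains k := by
    rw [PySem.Dict.contains_eq_isSome_get?, PySem.Dict.contains_eq_isSome_get?,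
      cwd_get?_mk_append P l k h]
  apply PySem.Dict.ext
  by_cases hck : (PySem.Dict.mk l).contains k = true
  · rw [PySem.Dict.items_insert_of_contains _ _ (by rw [hc]; exact hck),
      PySem.Dict.items_insert_of_contains _ _ hck]
    show (P ++ l).map _ = P ++ l.map _
    rw [List.map_append]
    congr 1
    conv_rhs => rw [show P = P.map id from (List.map_id P).symm]
    apply List.map_congr_left
    intro p hp
    simp [show (p.1 == k) = false by simp [h p hp]]
  · rw [PySem.Dict.items_insert_of_not_contains _ _ (by rw [hc]; exact Bool.eq_false_iff.mpr hck),
      PySem.Dict.items_insert_of_not_contains _ _ (Bool.eq_false_iff.mpr hck)]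
    show (P ++ l) ++ [(k, v)] = P ++ (l ++ [(k, v)])
    simp

theorem cwd_step_mk_append (P l : List (List String × List String)) (k : List String)
    (v : String) (h : ∀ p ∈ P, p.1 ≠ k) :
    cwdStep (PySem.Dict.mk (P ++ l)) k v
      = PySem.Dict.mk (P ++ (cwdStep (PySem.Dict.mk l) k v).items) := by
  unfold cwdStep
  rw [PySem.Dict.getD_eq_get?_getD, cwd_get?_mk_append P l k h, ← PySem.Dict.getD_eq_get?_getD]
  exact cwd_insert_mk_append P l k _ h

def cwdG (d : PySem.Dict (List String) (List String)) (ps : List (List String × String)) :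
    PySem.Dict (List String) (List String) :=
  ps.foldl (fun d p => cwdStep d p.1 p.2) d

theorem cwdG_mk_append (ps : List (List String × String)) :
    ∀ (P : List (List String × List String)) (l : List (List String × List String)),
    (∀ p ∈ ps, ∀ q ∈ P, q.1 ≠ p.1) →
    cwdG (PySem.Dict.mk (P ++ l)) ps = PySem.Dict.mk (P ++ (cwdG (PySem.Dict.mk l) ps).items) := by
  induction ps with
  | nil => intro P l h; rfl
  | cons p ps ih =>
    intro P l h
    show cwdG (cwdStep (PySem.Dict.mk (P ++ l)) p.1 p.2) ps = _
    rw [cwd_step_mk_append P l p.1 p.2 (fun q hq => h p (by simp) q hq)]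
    rw [ih P _ (fun r hr q hq => h r (by simp [hr]) q hq)]
    rfl

def cwdKey (corpus : List String) (L j : Nat) : List String := (corpus.drop (j + 1)).take L

def cwdPairs (corpus : List String) (L : Nat) : List (List String × String) :=
  (List.range (corpus.length - L)).map (fun j => (cwdKey corpus L j, corpus.getD j ""))

def cwdPass (corpus : List String) (L : Nat) (d : PySem.Dict (List String) (List String)) :
    PySem.Dict (List String) (List String) :=
  cwdG d (cwdPairs corpus L)

def cwdBucket (corpus : List String) (L : Nat) : PySem.Dict (List String) (List String) :=
  cwdPass corpus L PySem.Dict.empty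

theorem cwdPairs_key_length (corpus : List String) (L : Nat) :
    ∀ p ∈ cwdPairs corpus L, p.1.length = L := by
  intro p hp
  simp only [cwdPairs, List.mem_map, List.mem_range] at hp
  obtain ⟨j, hj, rfl⟩ := hp
  simp only [cwdKey, List.length_take, List.length_drop]
  omega

theorem cwdBucket_keys_length (corpus : List String) (L : Nat) :
    ∀ k ∈ (cwdBucket corpus L).keys, k.length = L := by
  intro k hk
  have : (cwdBucket corpus L).keys
      = PySem.Set.update (PySem.Dict.empty : PySem.Dict (List String) (List String)).keys
          ((cwdPairs corpus L).map Prod.fst) :=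
    PySem.Dict.keys_foldl_insert_key (cwdPairs corpus L) Prod.fst
      (fun d p => d.getD p.1 [] ++ [p.2]) _
  rw [this, PySem.Set.mem_update] at hk
  rcases hk with hk | hk
  · simp [PySem.Dict.keys_empty] at hk
  · obtain ⟨p, hp, rfl⟩ := List.mem_map.mp hk
    exact cwdPairs_key_length corpus L p hp

theorem cwdBucket_keys_nodup (corpus : List String) (L : Nat) :
    (cwdBucket corpus L).keys.Nodup :=
  PySem.Dict.nodup_keys_foldl_insert_key (cwdPairs corpus L) Prod.fst
    (fun d p => d.getD p.1 [] ++ [p.2]) _ (by simp)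

theorem cwdPass_items (corpus : List String) (L : Nat)
    (d : PySem.Dict (List String) (List String))
    (h : ∀ k ∈ d.keys, k.length ≠ L) :
    (cwdPass corpus L d).items = d.items ++ (cwdBucket corpus L).items := by
  have := cwdG_mk_append (cwdPairs corpus L) d.items []
    (fun p hp q hq => by
      intro hqp
      have hql : q.1 ∈ d.keys := List.mem_map_of_mem hq
      exact h q.1 hql (hqp ▸ cwdPairs_key_length corpus L p hp))
  rw [List.append_nil] at this
  exact congrArg PySem.Dict.items this

theorem cwdFlatten_keys (corpus : List String) (N : Nat) (k : List String)
    (hk : k ∈ (((List.range N).map (fun ℓ => (cwdBucket corpus (ℓ + 1)).items)).flatten).map Prod.fst) :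
    k.length ≤ N := by
  obtain ⟨p, hp, rfl⟩ := List.mem_map.mp hk
  obtain ⟨l, hl, hpl⟩ := List.mem_flatten.mp hp
  obtain ⟨ℓ, hℓ, rfl⟩ := List.mem_map.mp hl
  have hkey : p.1 ∈ (cwdBucket corpus (ℓ + 1)).keys := by
    simp only [PySem.Dict.keys]
    exact List.mem_map_of_mem hpl
  have := cwdBucket_keys_length corpus (ℓ + 1) p.1 hkey
  have hN := List.mem_range.mp hℓ
  omega

theorem cwdChain_items (corpus : List String) (N : Nat) :
    ((List.range N).foldl (fun d ℓ => cwdPass corpus (ℓ + 1) d) PySem.Dict.empty).items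
      = ((List.range N).map (fun ℓ => (cwdBucket corpus (ℓ + 1)).items)).flatten := by
  induction N with
  | zero => rfl
  | succ N ih =>
    rw [List.range_succ, List.foldl_append, List.map_append, List.flatten_append]
    simp only [List.foldl_cons, List.foldl_nil, List.map_cons, List.map_nil,
      List.flatten_cons, List.flatten_nil, List.append_nil]
    rw [cwdPass_items _ _ _ ?fresh, ih]
    case fresh =>
      intro k hk
      have hk' : k ∈ (((List.range N).map (fun ℓ => (cwdBucket corpus (ℓ + 1)).items)).flatten).map Prod.fst := by
        rw [← ih]
        simpa [PySem.Dict.keys] using hk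
      have := cwdFlatten_keys corpus N k hk'
      omega

theorem cwdMerge_items (corpus : List String) (N : Nat) :
    (((List.range N).map (fun ℓ => cwdBucket corpus (ℓ + 1))).foldl
        (fun res b => res.update b.items) PySem.Dict.empty).items
      = ((List.range N).map (fun ℓ => (cwdBucket corpus (ℓ + 1)).items)).flatten := by
  induction N with
  | zero => rfl
  | succ N ih =>
    rw [List.range_succ, List.map_append, List.foldl_append, List.map_append, List.flatten_append]
    simp only [List.foldl_cons, List.foldl_nil, List.map_cons, List.map_nil,
      List.flatten_cons, List.flatten_nil, List.append_nil]
    have hfresh : ∀ p ∈ (cwdBucket corpus (N + 1)).items,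
        (((List.range N).map (fun ℓ => cwdBucket corpus (ℓ + 1))).foldl
          (fun res b => res.update b.items) PySem.Dict.empty).contains p.1 = false := by
      intro p hp
      have hlen : p.1.length = N + 1 := by
        apply cwdBucket_keys_length corpus (N + 1) p.1
        simp only [PySem.Dict.keys]
        exact List.mem_map_of_mem hp
      rw [PySem.Dict.contains_eq_decide_mem_keys]
      simp only [decide_eq_false_iff_not]
      intro hmem
      have : p.1 ∈ (((List.range N).map (fun ℓ => (cwdBucket corpus (ℓ + 1)).items)).flatten).map Prod.fst := by
        rw [← ih]
        simpa [PySem.Dict.keys] using hmem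
      have := cwdFlatten_keys corpus N p.1 this
      omega
    have hupd := PySem.Dict.items_foldl_insert_fresh (cwdBucket corpus (N + 1)).items
      Prod.fst Prod.snd
      (((List.range N).map (fun ℓ => cwdBucket corpus (ℓ + 1))).foldl
        (fun res b => res.update b.items) PySem.Dict.empty)
      hfresh (cwdBucket_keys_nodup corpus (N + 1))
    rw [ih] at hupd
    simpa using hupd

theorem cwdStep_eq (d : PySem.Dict (List String) (List String)) (k : List String) (v : String) :
    (if d.contains k then d.insert k (d.getD k [] ++ [v]) else d.insert k [v]) = cwdStep d k v := by
  unfold cwdStep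
  by_cases h : d.contains k = true
  · rw [if_pos h]
  · rw [if_neg h]
    rw [PySem.Dict.getD_of_not_contains _ _ (Bool.eq_false_iff.mpr h), List.nil_append]

theorem cwd_pyGetD_last (xs : List String) (x d : String) :
    PySem.List.pyGetD (xs ++ [x]) (-1) d = x := by
  simp [PySem.List.pyGetD, PySem.List.pyGet?, PySem.List.pyIdx?]

theorem cwdA_inner (corpus : List String) (ℓ : Nat)
    (d : PySem.Dict (List String) (List String)) :
    (ngram_generator corpus ((ℓ : Int) + 1)).foldl (fun wd word_list =>
      let key := PySem.List.slice word_list none (some ((ℓ : Int) + 1))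
      if wd.contains key then wd.insert key (wd.getD key [] ++ [PySem.List.pyGetD word_list (-1) ""])
      else wd.insert key [PySem.List.pyGetD word_list (-1) ""]) d
    = cwdPass corpus (ℓ + 1) d := by
  unfold ngram_generator cwdPass cwdPairs cwdG
  rw [PySem.List.pyRange_one, List.map_map, List.foldl_map, List.foldl_map]
  have hlen : (((corpus.length : Int) - ((ℓ : Int) + 1)) - 0).toNat = corpus.length - (ℓ + 1) := by
    omega
  rw [hlen]
  apply PySem.List.foldl_congr_mem
  intro wd j hj
  have hjlt : j < corpus.length - (ℓ + 1) := List.mem_range.mp hj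
  simp only [Function.comp_apply, zero_add]
  -- the sliced window is exactly cwdKey
  have hslice : PySem.List.slice corpus (some ((j : Int) + 1)) (some ((j : Int) + ((ℓ : Int) + 1) + 1))
      = cwdKey corpus (ℓ + 1) j := by
    have h1 : ((j : Int) + 1) = ((j + 1 : Nat) : Int) := by push_cast; ring
    have h2 : ((j : Int) + ((ℓ : Int) + 1) + 1) = ((j + 1 + (ℓ + 1) : Nat) : Int) := by push_cast; ring
    rw [h2, h1, PySem.List.slice_natCast]
    unfold cwdKey
    congr 1
    omega
  rw [hslice]
  have hwlen : (cwdKey corpus (ℓ + 1) j).length = ℓ + 1 := by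
    unfold cwdKey
    simp only [List.length_take, List.length_drop]
    omega
  have hkey : ∀ c : String, PySem.List.slice (cwdKey corpus (ℓ + 1) j ++ [c])
      none (some ((ℓ : Int) + 1)) = cwdKey corpus (ℓ + 1) j := by
    intro c
    have h3 : ((ℓ : Int) + 1) = ((ℓ + 1 : Nat) : Int) := by push_cast; ring
    rw [h3, PySem.List.slice_to_natCast]
    exact List.take_left' hwlen
  simp only [cwd_pyGetD_last, PySem.List.pyGetD_natCast, hkey]
  exact cwdStep_eq wd (cwdKey corpus (ℓ + 1) j) (corpus.getD j "")

theorem cwdA_norm (n : Int) (corpus : List String) :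
    create_word_dict n corpus
      = ((List.range n.toNat).foldl (fun d ℓ => cwdPass corpus (ℓ + 1) d) PySem.Dict.empty).items := by
  unfold create_word_dict
  rw [PySem.List.pyRange_one, List.foldl_map]
  congr 1
  have h0 : ((n : Int) - 0).toNat = n.toNat := by omega
  rw [h0]
  apply PySem.List.foldl_congr_mem
  intro d ℓ _
  simpa only [zero_add] using cwdA_inner corpus ℓ d

def cwdSetFold {α : Type} (e : α) (h : Nat → α → α) (w : Nat) (bs : List α) : List α :=
  (List.range w).foldl (fun bs k => bs.set k (h k (bs.getD k e))) bs

theorem cwdSetFold_length {α : Type} (e : α) (h : Nat → α → α) (w : Nat) (bs : List α) :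
    (cwdSetFold e h w bs).length = bs.length := by
  unfold cwdSetFold
  induction w with
  | zero => rfl
  | succ w ih => rw [List.range_succ, List.foldl_append]; simpa using ih

theorem cwdSetFold_getD {α : Type} (e : α) (h : Nat → α → α) (w : Nat) (bs : List α) (ℓ : Nat)
    (hw : w ≤ bs.length) (_hℓ : ℓ < bs.length) :
    (cwdSetFold e h w bs).getD ℓ e = if ℓ < w then h ℓ (bs.getD ℓ e) else bs.getD ℓ e := by
  induction w with
  | zero => simp [cwdSetFold]
  | succ w ih =>
    have hstep : cwdSetFold e h (w + 1) bs
        = (cwdSetFold e h w bs).set w (h w ((cwdSetFold e h w bs).getD w e)) := by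
      unfold cwdSetFold
      rw [List.range_succ, List.foldl_append]
      rfl
    have hwlen : w < bs.length := by omega
    have hlen : (cwdSetFold e h w bs).length = bs.length := cwdSetFold_length e h w bs
    have ihw := ih (by omega)
    rw [hstep]
    by_cases hew : ℓ = w
    · subst hew
      rw [List.getD_eq_getElem _ _ (by simpa [hlen] using hwlen)]
      rw [List.getElem_set_self (by simpa [hlen] using hwlen)]
      rw [ihw, if_neg (by omega), if_pos (by omega)]
    · have : ((cwdSetFold e h w bs).set w (h w ((cwdSetFold e h w bs).getD w e))).getD ℓ e
          = (cwdSetFold e h w bs).getD ℓ e := by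
        rw [List.getD_eq_getElem?_getD, List.getElem?_set_ne (by omega), ← List.getD_eq_getElem?_getD]
      rw [this, ihw]
      by_cases hlt : ℓ < w
      · rw [if_pos hlt, if_pos (by omega)]
      · rw [if_neg hlt, if_neg (by omega)]

theorem cwdFoldSetFold_length {α : Type} (e : α) (h : Nat → Nat → α → α) (w : Nat → Nat)
    (is : List Nat) : ∀ (bs : List α),
    (is.foldl (fun bs i => cwdSetFold e (h i) (w i) bs) bs).length = bs.length := by
  induction is with
  | nil => intro bs; rfl
  | cons i is ih =>
    intro bs
    simp only [List.foldl_cons]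
    rw [ih, cwdSetFold_length]

theorem cwdFoldSetFold_getD {α : Type} (e : α) (h : Nat → Nat → α → α) (w : Nat → Nat)
    (is : List Nat) : ∀ (bs : List α) (ℓ : Nat), ℓ < bs.length → (∀ i ∈ is, w i ≤ bs.length) →
    ((is.foldl (fun bs i => cwdSetFold e (h i) (w i) bs) bs).getD ℓ e)
      = is.foldl (fun d i => if ℓ < w i then h i ℓ d else d) (bs.getD ℓ e) := by
  induction is with
  | nil => intros; rfl
  | cons i is ih =>
    intro bs ℓ hℓ hw
    simp only [List.foldl_cons]
    rw [ih _ ℓ (by rw [cwdSetFold_length]; exact hℓ)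
      (fun i' hi' => by rw [cwdSetFold_length]; exact hw i' (List.mem_cons_of_mem i hi'))]
    rw [cwdSetFold_getD e (h i) (w i) bs ℓ (hw i List.mem_cons_self) hℓ]

theorem cwd_foldl_ite_range {α : Type} (f : α → Nat → α) (c : Nat) :
    ∀ (m : Nat) (d : α), c ≤ m →
    (List.range m).foldl (fun d i => if i < c then f d i else d) d
      = (List.range c).foldl f d := by
  intro m
  induction m with
  | zero =>
    intro d h
    have : c = 0 := by omega
    subst this; rfl
  | succ m ih =>
    intro d h
    by_cases hc : c ≤ m
    · rw [List.range_succ, List.foldl_append, ih d hc]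
      simp [show ¬ m < c by omega]
    · have hcm : c = m + 1 := by omega
      subst hcm
      exact PySem.List.foldl_congr_mem _ _ _ _
        (fun acc x hx => by rw [if_pos (List.mem_range.mp hx)])

def cwdW (corpus : List String) (nn : Nat) (i : Nat) : Nat := min nn (corpus.length - (i + 1))

def cwdH (corpus : List String) (nn i k : Nat) (d : PySem.Dict (List String) (List String)) :
    PySem.Dict (List String) (List String) :=
  cwdStep d (((corpus.drop (i + 1)).take nn).take (k + 1)) (corpus.getD i "")

theorem cwdB_inner (n : Int) (corpus : List String) (hn : 0 < n) (i : Nat)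
    (bs : List (PySem.Dict (List String) (List String))) :
    (PySem.List.pyRange 1 (((PySem.List.slice corpus (some ((i : Int) + 1)) (some ((i : Int) + 1 + n))).length : Int) + 1) 1).foldl
      (fun bs' L => bs'.set (L - 1).toNat
        (cwdSetdefAppend (bs'.getD (L - 1).toNat PySem.Dict.empty)
          (PySem.List.slice (PySem.List.slice corpus (some ((i : Int) + 1)) (some ((i : Int) + 1 + n))) none (some L))
          (PySem.List.pyGetD corpus (i : Int) ""))) bs
    = cwdSetFold PySem.Dict.empty (cwdH corpus n.toNat i) (cwdW corpus n.toNat i) bs := by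
  have h1 : ((i : Int) + 1) = ((i + 1 : Nat) : Int) := by push_cast; ring
  have h2 : ((i : Int) + 1 + n) = ((i + 1 + n.toNat : Nat) : Int) := by push_cast; omega
  have hwin : PySem.List.slice corpus (some ((i : Int) + 1)) (some ((i : Int) + 1 + n))
      = (corpus.drop (i + 1)).take n.toNat := by
    rw [h2, h1, PySem.List.slice_natCast]
    congr 1
    omega
  rw [hwin]
  have hwl : ((corpus.drop (i + 1)).take n.toNat).length = cwdW corpus n.toNat i := by
    simp [cwdW]
  rw [hwl]
  rw [PySem.List.pyRange_one, List.foldl_map]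
  have htn : (((cwdW corpus n.toNat i : Nat) : Int) + 1 - 1).toNat = cwdW corpus n.toNat i := by omega
  rw [htn]
  unfold cwdSetFold
  apply PySem.List.foldl_congr_mem
  intro bs' k _
  have hk1 : ((1 : Int) + (k : Int) - 1).toNat = k := by omega
  have hk2 : ((1 : Int) + (k : Int)) = ((k + 1 : Nat) : Int) := by push_cast; ring
  rw [hk1, hk2, PySem.List.slice_to_natCast, PySem.List.pyGetD_natCast]
  rfl

theorem cwdB_norm (n : Int) (corpus : List String) (hn : 0 < n) :
    create_word_dict_alt n corpus
      = (((List.range n.toNat).map (fun ℓ => cwdBucket corpus (ℓ + 1))).foldl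
          (fun res b => res.update b.items) PySem.Dict.empty).items := by
  unfold create_word_dict_alt
  rw [if_neg (by omega)]
  show (((PySem.List.pyRange 0 ((corpus.length : Int)) 1).foldl (fun bs i =>
      (PySem.List.pyRange 1 (((PySem.List.slice corpus (some (i + 1)) (some (i + 1 + n))).length : Int) + 1) 1).foldl
        (fun bs' L => bs'.set (L - 1).toNat
          (cwdSetdefAppend (bs'.getD (L - 1).toNat PySem.Dict.empty)
            (PySem.List.slice (PySem.List.slice corpus (some (i + 1)) (some (i + 1 + n))) none (some L))
            (PySem.List.pyGetD corpus i ""))) bs)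
      (List.replicate n.toNat PySem.Dict.empty)).foldl
        (fun res b => res.update b.items) PySem.Dict.empty).items = _
  have hb : (PySem.List.pyRange 0 ((corpus.length : Int)) 1).foldl (fun bs i =>
      (PySem.List.pyRange 1 (((PySem.List.slice corpus (some (i + 1)) (some (i + 1 + n))).length : Int) + 1) 1).foldl
        (fun bs' L => bs'.set (L - 1).toNat
          (cwdSetdefAppend (bs'.getD (L - 1).toNat PySem.Dict.empty)
            (PySem.List.slice (PySem.List.slice corpus (some (i + 1)) (some (i + 1 + n))) none (some L))
            (PySem.List.pyGetD corpus i ""))) bs)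
      (List.replicate n.toNat PySem.Dict.empty)
      = (List.range n.toNat).map (fun ℓ => cwdBucket corpus (ℓ + 1)) := by
    rw [PySem.List.pyRange_zero_natCast, List.foldl_map]
    rw [PySem.List.foldl_congr_mem _ _ _ _ (fun bs i _ => cwdB_inner n corpus hn i bs)]
    apply List.ext_getElem
    · rw [cwdFoldSetFold_length]
      simp
    · intro ℓ hℓ1 hℓ2
      have hlen : ((List.range corpus.length).foldl
          (fun bs i => cwdSetFold PySem.Dict.empty (cwdH corpus n.toNat i) (cwdW corpus n.toNat i) bs)
          (List.replicate n.toNat PySem.Dict.empty)).length = n.toNat := by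
        rw [cwdFoldSetFold_length]; simp
      have hℓN : ℓ < n.toNat := by rw [hlen] at hℓ1; exact hℓ1
      rw [← List.getD_eq_getElem _ PySem.Dict.empty hℓ1]
      rw [cwdFoldSetFold_getD PySem.Dict.empty (cwdH corpus n.toNat) (cwdW corpus n.toNat)
        (List.range corpus.length) (List.replicate n.toNat PySem.Dict.empty) ℓ
        (by simpa using hℓN)
        (fun i _ => by simp [cwdW])]
      have hbase : (List.replicate n.toNat (PySem.Dict.empty : PySem.Dict (List String) (List String))).getD ℓ PySem.Dict.empty
          = PySem.Dict.empty := by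
        rw [List.getD_eq_getElem _ _ (by simpa using hℓN)]
        simp
      rw [hbase]
      rw [PySem.List.foldl_congr_mem _ _ _ _ (fun d i hi => by
        show (if ℓ < cwdW corpus n.toNat i then cwdH corpus n.toNat i ℓ d else d)
          = (if i < corpus.length - (ℓ + 1) then cwdStep d (cwdKey corpus (ℓ + 1) i) (corpus.getD i "") else d)
        by_cases hg : ℓ < cwdW corpus n.toNat i
        · rw [if_pos hg, if_pos (by simp [cwdW] at hg; omega)]
          unfold cwdH
          rw [List.take_take, Nat.min_eq_left (by simp [cwdW] at hg; omega)]
          rfl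
        · rw [if_neg hg, if_neg (by simp [cwdW] at hg; omega)])]
      rw [cwd_foldl_ite_range _ _ _ _ (by omega)]
      rw [List.getElem_map]
      simp only [List.getElem_range]
      unfold cwdBucket cwdPass cwdPairs cwdG
      rw [List.foldl_map]
  rw [hb]

theorem cwd_final (n : Int) (corpus : List String) :
    create_word_dict n corpus = create_word_dict_alt n corpus := by
  by_cases hn : n ≤ 0
  · rw [cwdA_norm]
    have h0 : n.toNat = 0 := by omega
    rw [h0]
    unfold create_word_dict_alt
    rw [if_pos hn]
    rfl
  · rw [cwdA_norm, cwdChain_items, cwdB_norm n corpus (by omega), cwdMerge_items]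

-- ===== VERDICT (by name: the statement is the Claim_ definition above) =====
theorem create_word_dict_spec : Claim_equal_create_word_dict := by
  intro n corpus _
  exact cwd_final n corpus
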